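-- pv_equiv track=rewrite | github.com/rt-yty/AutoBrowser | browser/controller.py | validate_selector
-- ===== SOURCE A (Python) =====
-- from typing import Optional, Tuple
--
-- def validate_selector(selector: str) -> Tuple[bool, str]:
--     """
--     Validate a Playwright selector before use.
--
--     Args:
--         selector: The selector string to validate
--
--     Returns:
--         Tuple of (is_valid, error_message)
--         If valid: (True, "")
--         If invalid: (False, "error description")
--     """
--     if not selector or not selector.strip():
--         return False, "Selector cannot be empty"
--
--     selector = selector.strip()
--
--     # Check for comma-separated selectors (not valid as single selector)
--     # Allow commas inside quotes or square brackets
--     in_quotes = False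
--     in_brackets = 0
--     quote_char = None
--
--     for i, char in enumerate(selector):
--         if char in ('"', "'") and (i == 0 or selector[i - 1] != "\\"):
--             if not in_quotes:
--                 in_quotes = True
--                 quote_char = char
--             elif char == quote_char:
--                 in_quotes = False
--                 quote_char = None
--         elif char == "[" and not in_quotes:
--             in_brackets += 1
--         elif char == "]" and not in_quotes:
--             in_brackets -= 1
--         elif char == "," and not in_quotes and in_brackets == 0:
--             return False, "Selector contains comma outside quotes/brackets - use a single specific selector instead of multiple fragments"
--
--     # Check for double commas
--     if ",," in selector:
--         return False, "Selector contains double comma - invalid syntax"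
--
--     # Check for suspicious patterns
--     if selector.count(">>") > 0 and selector.count(",") > 0:
--         return False, "Selector mixes >> and comma syntax - use one style consistently"
--
--     return True, ""
-- ===== SOURCE B (Python) =====
-- def validate_selector(selector: str):
--     if not selector or not selector.strip():
--         return False, "Selector cannot be empty"
--
--     s = selector.strip()
--
--     # Two staged passes instead of one combined state machine:
--     # pass 1 deletes every quoted span (walking an index, jumping over each
--     # quoted region to its unescaped closing quote), pass 2 scans the
--     # quote-free remainder with only a bracket-depth counter.
--     outside = _drop_quoted(s)
--
--     depth = 0
--     for ch in outside:
--         if ch == "[":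
--             depth += 1
--         elif ch == "]":
--             depth -= 1
--         elif ch == "," and depth == 0:
--             return False, "Selector contains comma outside quotes/brackets - use a single specific selector instead of multiple fragments"
--
--     if ",," in s:
--         return False, "Selector contains double comma - invalid syntax"
--
--     if s.count(">>") > 0 and s.count(",") > 0:
--         return False, "Selector mixes >> and comma syntax - use one style consistently"
--
--     return True, ""
--
--
-- def _drop_quoted(s):
--     """Return the characters of s that lie outside quoted spans
--     (the quote characters themselves are dropped too)."""
--     out = []
--     i, n = 0, len(s)
--     while i < n:
--         c = s[i]
--         if c in ('"', "'") and (i == 0 or s[i - 1] != "\\"):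
--             i += 1
--             while i < n and not (s[i] == c and s[i - 1] != "\\"):
--                 i += 1
--             i += 1  # past the closing quote (or past the end)
--         else:
--             out.append(c)
--             i += 1
--     return out
-- ===== Notes on version B (the rewrite author's own statement) =====
-- stated objective: alternative
-- what changed: Replaces A's single combined quote/bracket state machine with early return by two staged passes: an index-walking pass that deletes quoted spans (jumping each span to its unescaped closing quote), then a bracket-depth-only scan of the quote-free remainder for an outside comma; the later double-comma and >>-mix checks are unchanged.
import Mathlib
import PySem

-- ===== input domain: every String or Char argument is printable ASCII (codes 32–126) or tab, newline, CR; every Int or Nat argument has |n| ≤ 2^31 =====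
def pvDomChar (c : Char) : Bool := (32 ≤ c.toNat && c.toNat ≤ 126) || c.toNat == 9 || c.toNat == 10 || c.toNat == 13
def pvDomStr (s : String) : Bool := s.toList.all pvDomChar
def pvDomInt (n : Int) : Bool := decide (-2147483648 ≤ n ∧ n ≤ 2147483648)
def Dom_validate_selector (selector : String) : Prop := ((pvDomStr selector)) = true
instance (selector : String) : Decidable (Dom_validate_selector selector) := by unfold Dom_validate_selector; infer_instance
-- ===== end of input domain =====

-- B replaces A's single combined quote/bracket state machine by two staged passes
-- (delete quoted spans, then scan bracket depth): alternative decomposition, same cost.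

-- ===== PORT A =====
-- A's for-loop over enumerate(selector) with the selector[i-1] escape lookup; the early return becomes the Option result.
def pvALoop (sl : List Char) : List Char → Nat → Bool → Option Char → Int → Option (Bool × String)
  | [], _, _, _, _ => none
  | ch :: rest, i, in_q, qc, depth =>
    if (ch = '"' ∨ ch = '\'') ∧ (i = 0 ∨ PySem.List.pyGet? sl ((i : Int) - 1) ≠ some '\\') then
      if ¬ in_q then pvALoop sl rest (i + 1) true (some ch) depth
      else if some ch = qc then pvALoop sl rest (i + 1) false none depth
      else pvALoop sl rest (i + 1) in_q qc depth
    else if ch = '[' ∧ ¬ in_q then pvALoop sl rest (i + 1) in_q qc (depth + 1)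
    else if ch = ']' ∧ ¬ in_q then pvALoop sl rest (i + 1) in_q qc (depth - 1)
    else if ch = ',' ∧ ¬ in_q ∧ depth = 0 then
      some (false, "Selector contains comma outside quotes/brackets - use a single specific selector instead of multiple fragments")
    else pvALoop sl rest (i + 1) in_q qc depth

def validate_selector (selector : String) : Bool × String :=
  if selector = "" ∨ PySem.Str.strip selector = "" then (false, "Selector cannot be empty")
  else
    match pvALoop (PySem.Str.strip selector).toList (PySem.Str.strip selector).toList 0 false none 0 with
    | some r => r
    | none =>
      if PySem.Chars.isIn [',', ','] (PySem.Str.strip selector).toList then (false, "Selector contains double comma - invalid syntax")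
      else if PySem.Chars.count (PySem.Str.strip selector).toList ['>', '>'] > 0 ∧ PySem.Chars.count (PySem.Str.strip selector).toList [','] > 0 then
        (false, "Selector mixes >> and comma syntax - use one style consistently")
      else (true, "")

-- ===== PORT B =====
-- B's inner while loop: advance j past the unescaped closing quote c (or past the end).
def pvSkipClose (sl : List Char) (c : Char) (j : Nat) : Nat :=
  if h : j < sl.length then
    if sl[j] = c ∧ sl[j - 1]? ≠ some '\\' then j + 1
    else pvSkipClose sl c (j + 1)
  else j + 1
termination_by sl.length - j

theorem pvSkipClose_ge (sl : List Char) (c : Char) : ∀ j, j + 1 ≤ pvSkipClose sl c j := by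
  intro j
  induction hk : sl.length - j using Nat.strong_induction_on generalizing j with
  | _ k ih =>
    unfold pvSkipClose
    split
    · split
      · omega
      · have := ih (sl.length - (j + 1)) (by omega) (j + 1) rfl; omega
    · omega

-- B's outer while loop (_drop_quoted): keep chars outside quoted spans, jump over quoted spans.
def pvDropQuoted (sl : List Char) (i : Nat) : List Char :=
  if h : i < sl.length then
    if (sl[i] = '"' ∨ sl[i] = '\'') ∧ (i = 0 ∨ sl[i - 1]? ≠ some '\\') then
      pvDropQuoted sl (pvSkipClose sl sl[i] (i + 1))
    else sl[i] :: pvDropQuoted sl (i + 1)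
  else []
termination_by sl.length - i
decreasing_by
  · have := pvSkipClose_ge sl sl[i] (i + 1); omega
  · omega

-- B's pass-2 for-loop: a comma at bracket depth 0?
def pvCommaOutside : List Char → Int → Bool
  | [], _ => false
  | ch :: rest, depth =>
    if ch = '[' then pvCommaOutside rest (depth + 1)
    else if ch = ']' then pvCommaOutside rest (depth - 1)
    else if ch = ',' ∧ depth = 0 then true
    else pvCommaOutside rest depth

def validate_selector_alt (selector : String) : Bool × String :=
  if selector = "" ∨ PySem.Str.strip selector = "" then (false, "Selector cannot be empty")
  else
    if pvCommaOutside (pvDropQuoted (PySem.Str.strip selector).toList 0) 0 then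
      (false, "Selector contains comma outside quotes/brackets - use a single specific selector instead of multiple fragments")
    else if PySem.Chars.isIn [',', ','] (PySem.Str.strip selector).toList then (false, "Selector contains double comma - invalid syntax")
    else if PySem.Chars.count (PySem.Str.strip selector).toList ['>', '>'] > 0 ∧ PySem.Chars.count (PySem.Str.strip selector).toList [','] > 0 then
      (false, "Selector mixes >> and comma syntax - use one style consistently")
    else (true, "")

-- ===== PRECONDITION & SPEC =====
def Spec_validate_selector (selector : String) (out : Bool × String) : Prop := out = validate_selector_alt selector
instance (selector : String) (out : Bool × String) : Decidable (Spec_validate_selector selector out) := by unfold Spec_validate_selector; infer_instance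

-- ===== CLAIM (what is proved, stated in full; the proofs are below) =====
def Claim_equal_validate_selector : Prop := ∀ (selector : String), Dom_validate_selector selector → Spec_validate_selector selector (validate_selector selector)

-- ===== LEMMAS AND PROOFS =====

-- A's escape condition in terms of plain getElem?
theorem pvEscCond (sl : List Char) (i : Nat) :
    ((i = 0 ∨ PySem.List.pyGet? sl ((i : Int) - 1) ≠ some '\\')) ↔ (i = 0 ∨ sl[i - 1]? ≠ some '\\') := by
  cases i with
  | zero => simp
  | succ k =>
    have h1 : ((k + 1 : Nat) : Int) - 1 = (k : Int) := by push_cast; ring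
    rw [h1, PySem.List.pyGet?_natCast]
    simp

-- one-step unfolding equations (targeted rewriting)
theorem pvALoop_nil (sl : List Char) (i : Nat) (in_q : Bool) (qc : Option Char) (depth : Int) :
    pvALoop sl [] i in_q qc depth = none := rfl

theorem pvALoop_cons (sl : List Char) (ch : Char) (rest : List Char) (i : Nat) (in_q : Bool)
    (qc : Option Char) (depth : Int) :
    pvALoop sl (ch :: rest) i in_q qc depth =
      (if (ch = '"' ∨ ch = '\'') ∧ (i = 0 ∨ PySem.List.pyGet? sl ((i : Int) - 1) ≠ some '\\') then
        if ¬ in_q then pvALoop sl rest (i + 1) true (some ch) depth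
        else if some ch = qc then pvALoop sl rest (i + 1) false none depth
        else pvALoop sl rest (i + 1) in_q qc depth
      else if ch = '[' ∧ ¬ in_q then pvALoop sl rest (i + 1) in_q qc (depth + 1)
      else if ch = ']' ∧ ¬ in_q then pvALoop sl rest (i + 1) in_q qc (depth - 1)
      else if ch = ',' ∧ ¬ in_q ∧ depth = 0 then
        some (false, "Selector contains comma outside quotes/brackets - use a single specific selector instead of multiple fragments")
      else pvALoop sl rest (i + 1) in_q qc depth) := rfl

-- inside a quoted span, A scans exactly to pvSkipClose and leaves the quote state
theorem pvL2 (sl : List Char) (c : Char) (hc : c = '"' ∨ c = '\'') :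
    ∀ k j, sl.length - j ≤ k → 1 ≤ j → ∀ depth : Int,
      pvALoop sl (sl.drop j) j true (some c) depth =
        pvALoop sl (sl.drop (pvSkipClose sl c j)) (pvSkipClose sl c j) false none depth := by
  intro k
  induction k with
  | zero =>
    intro j hk h1 depth
    have hj : sl.length ≤ j := by omega
    rw [List.drop_eq_nil_of_le hj, pvALoop_nil]
    unfold pvSkipClose
    rw [dif_neg (by omega)]
    rw [List.drop_eq_nil_of_le (by omega), pvALoop_nil]
  | succ k ih =>
    intro j hk h1 depth
    by_cases hj : j < sl.length
    · have hcons : sl[j] :: sl.drop (j + 1) = sl.drop j := List.getElem_cons_drop hj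
      rw [← hcons, pvALoop_cons]
      conv_rhs => unfold pvSkipClose
      rw [dif_pos hj]
      by_cases hq : (sl[j] = '"' ∨ sl[j] = '\'') ∧ (j = 0 ∨ sl[j - 1]? ≠ some '\\')
      · rw [if_pos ⟨hq.1, (pvEscCond sl j).mpr hq.2⟩]
        have ht : ¬ (¬ ((true : Bool) = true)) := by decide
        rw [if_neg ht]
        by_cases he : sl[j] = c
        · rw [if_pos (by rw [he]), if_pos ⟨he, hq.2.resolve_left (by omega)⟩]
        · rw [if_neg (by simpa using he), if_neg (fun hs => he hs.1)]
          exact ih (j + 1) (by omega) (by omega) depth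
      · rw [if_neg (fun h => hq ⟨h.1, (pvEscCond sl j).mp h.2⟩)]
        rw [if_neg (by simp), if_neg (by simp), if_neg (by simp)]
        have hs : ¬ (sl[j] = c ∧ sl[j - 1]? ≠ some '\\') := by
          intro hs
          exact hq ⟨by rcases hc with h | h <;> rw [hs.1, h] <;> simp, Or.inr hs.2⟩
        rw [if_neg hs]
        exact ih (j + 1) (by omega) (by omega) depth
    · have hj' : sl.length ≤ j := by omega
      rw [List.drop_eq_nil_of_le hj', pvALoop_nil]
      unfold pvSkipClose
      rw [dif_neg (by omega)]
      rw [List.drop_eq_nil_of_le (by omega), pvALoop_nil]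

-- outside quotes, A's loop result is B's two staged passes
theorem pvL1 (sl : List Char) :
    ∀ k i, sl.length - i ≤ k → ∀ depth : Int,
      pvALoop sl (sl.drop i) i false none depth =
        (if pvCommaOutside (pvDropQuoted sl i) depth then
          some (false, "Selector contains comma outside quotes/brackets - use a single specific selector instead of multiple fragments")
        else none) := by
  intro k
  induction k using Nat.strong_induction_on with
  | _ k ih =>
    intro i hk depth
    by_cases hi : i < sl.length
    · have hkpos : 1 ≤ k := by omega
      have hcons : sl[i] :: sl.drop (i + 1) = sl.drop i := List.getElem_cons_drop hi
      rw [← hcons, pvALoop_cons]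
      conv_rhs => unfold pvDropQuoted
      rw [dif_pos hi]
      by_cases hq : (sl[i] = '"' ∨ sl[i] = '\'') ∧ (i = 0 ∨ sl[i - 1]? ≠ some '\\')
      · rw [if_pos ⟨hq.1, (pvEscCond sl i).mpr hq.2⟩, if_pos (by decide), if_pos hq]
        have h2 := pvSkipClose_ge sl sl[i] (i + 1)
        rw [pvL2 sl sl[i] hq.1 sl.length (i + 1) (by omega) (by omega) depth]
        exact ih (k - 1) (by omega) (pvSkipClose sl sl[i] (i + 1)) (by omega) depth
      · rw [if_neg (fun h => hq ⟨h.1, (pvEscCond sl i).mp h.2⟩), if_neg hq]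
        by_cases hb1 : sl[i] = '['
        · rw [if_pos ⟨hb1, by decide⟩]
          rw [ih (k - 1) (by omega) (i + 1) (by omega) (depth + 1)]
          conv_rhs => rw [pvCommaOutside, if_pos hb1]
        · rw [if_neg (fun h => hb1 h.1)]
          by_cases hb2 : sl[i] = ']'
          · rw [if_pos ⟨hb2, by decide⟩]
            rw [ih (k - 1) (by omega) (i + 1) (by omega) (depth - 1)]
            conv_rhs => rw [pvCommaOutside, if_neg hb1, if_pos hb2]
          · rw [if_neg (fun h => hb2 h.1)]
            by_cases hb3 : sl[i] = ',' ∧ depth = 0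
            · rw [if_pos ⟨hb3.1, by decide, hb3.2⟩]
              conv_rhs => rw [pvCommaOutside, if_neg hb1, if_neg hb2, if_pos hb3]
              rw [if_pos rfl]
            · rw [if_neg (fun h => hb3 ⟨h.1, h.2.2⟩)]
              rw [ih (k - 1) (by omega) (i + 1) (by omega) depth]
              conv_rhs => rw [pvCommaOutside, if_neg hb1, if_neg hb2, if_neg hb3]
    · have hi' : sl.length ≤ i := by omega
      rw [List.drop_eq_nil_of_le hi', pvALoop_nil]
      conv_rhs => unfold pvDropQuoted
      rw [dif_neg (by omega)]
      rw [show pvCommaOutside [] depth = false from rfl]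
      rw [if_neg (by simp)]

-- ===== VERDICT (by name: the statement is the Claim_ definition above) =====
theorem validate_selector_spec : Claim_equal_validate_selector := by
  intro selector _
  unfold Spec_validate_selector validate_selector validate_selector_alt
  by_cases h : selector = "" ∨ PySem.Str.strip selector = ""
  · rw [if_pos h, if_pos h]
  · have hL := pvL1 ((PySem.Str.strip selector).toList) ((PySem.Str.strip selector).toList).length 0
        (by omega) 0
    rw [List.drop_zero] at hL
    rw [if_neg h, if_neg h, hL]
    by_cases hm : pvCommaOutside (pvDropQuoted (PySem.Str.strip selector).toList 0) 0
    · rw [if_pos hm]; rw [if_pos hm]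
    · rw [if_neg hm]; rw [if_neg hm]
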